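-- pv_equiv track=rewrite | github.com/XChen-Zero/OneEval | scripts/extract_results.py | slugify_segment
-- ===== SOURCE A (Python) =====
-- def slugify_segment(value: str) -> str:
--     text = value.strip().lower()
--     chars: list[str] = []
--     last_dash = False
--     for char in text:
--         if char.isalnum():
--             chars.append(char)
--             last_dash = False
--             continue
--         if char in {".", "_", "-"}:
--             chars.append(char)
--             last_dash = False
--             continue
--         if not last_dash:
--             chars.append("-")
--             last_dash = True
--     slug = "".join(chars).strip("._-")
--     return slug or "item"
-- ===== SOURCE B (Python) =====
-- def slugify_segment(value: str) -> str:
--     text = value.strip().lower()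
--
--     def keep(c: str) -> bool:
--         return c.isalnum() or c in "._-"
--
--     pieces: list[str] = []
--     i, n = 0, len(text)
--     while i < n:
--         if keep(text[i]):
--             j = i + 1
--             while j < n and keep(text[j]):
--                 j += 1
--             pieces.append(text[i:j])
--             i = j
--         else:
--             pieces.append("-")
--             i += 1
--             while i < n and not keep(text[i]):
--                 i += 1
--     return "".join(pieces).strip("._-") or "item"
-- ===== Notes on version B (the rewrite author's own statement) =====
-- stated objective: alternative
-- what changed: Replaces A's per-character loop with a last_dash flag by a run-based scanner that copies whole runs of kept characters with an inner advance and emits a single dash per run of dropped characters, skipping the rest of the run.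
import Mathlib
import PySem

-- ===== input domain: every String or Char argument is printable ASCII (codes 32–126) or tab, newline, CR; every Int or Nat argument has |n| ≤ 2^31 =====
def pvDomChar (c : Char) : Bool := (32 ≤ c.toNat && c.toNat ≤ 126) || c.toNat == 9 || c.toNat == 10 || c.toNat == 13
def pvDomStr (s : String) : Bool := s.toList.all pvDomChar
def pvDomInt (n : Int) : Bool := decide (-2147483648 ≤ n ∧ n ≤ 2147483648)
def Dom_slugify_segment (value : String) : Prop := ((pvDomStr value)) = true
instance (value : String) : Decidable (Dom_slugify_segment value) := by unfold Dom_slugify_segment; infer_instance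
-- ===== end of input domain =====

-- B replaces A's per-character loop with a last_dash flag by a run-based scanner (objective: alternative decomposition, same cost).

-- ===== PORT A =====
-- one step of A's for-loop: state = (chars, last_dash)
def slugStepA (st : List Char × Bool) (c : Char) : List Char × Bool :=
  if PySem.Chars.isalnum c then (st.1 ++ [c], false)
  else if c = '.' ∨ c = '_' ∨ c = '-' then (st.1 ++ [c], false)
  else if !st.2 then (st.1 ++ ['-'], true)
  else st

def slugify_segment (value : String) : String :=
  let text := PySem.Chars.lower (PySem.Chars.strip value.toList)
  let st := text.foldl slugStepA ([], false)
  let slug := PySem.Chars.stripChars st.1 ['.', '_', '-']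
  if slug = [] then "item" else String.mk slug

-- ===== PORT B =====
def slugKeep (c : Char) : Bool :=
  PySem.Chars.isalnum c || PySem.Chars.isIn [c] ['.', '_', '-']

-- the run scanner of Source B: copy a whole kept run, or emit one '-' and skip the dropped run
def slugRuns : List Char → List Char
  | [] => []
  | c :: rest =>
    if slugKeep c then
      c :: rest.takeWhile slugKeep ++ slugRuns (rest.dropWhile slugKeep)
    else
      '-' :: slugRuns (rest.dropWhile (fun x => !slugKeep x))
termination_by l => l.length
decreasing_by
  · have := List.length_dropWhile_le slugKeep rest; simp; omega
  · have := List.length_dropWhile_le (fun x => !slugKeep x) rest; simp; omega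

def slugify_segment_alt (value : String) : String :=
  let text := PySem.Chars.lower (PySem.Chars.strip value.toList)
  let pieces := slugRuns text
  let slug := PySem.Chars.stripChars pieces ['.', '_', '-']
  if slug = [] then "item" else String.mk slug

-- ===== PRECONDITION & SPEC =====
def Spec_slugify_segment (value : String) (out : String) : Prop := out = slugify_segment_alt value
instance (value : String) (out : String) : Decidable (Spec_slugify_segment value out) := by unfold Spec_slugify_segment; infer_instance

-- ===== CLAIM (what is proved, stated in full; the proofs are below) =====
def Claim_equal_slugify_segment : Prop := ∀ (value : String), Dom_slugify_segment value → Spec_slugify_segment value (slugify_segment value)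

-- ===== LEMMAS AND PROOFS =====

-- A's loop as a direct recursion on the text with the last_dash flag
def slugG : List Char → Bool → List Char
  | [], _ => []
  | c :: rest, b =>
    if slugKeep c then c :: slugG rest false
    else if b then slugG rest true
    else '-' :: slugG rest true

lemma slugStepA_eq (st : List Char × Bool) (c : Char) :
    slugStepA st c =
      if slugKeep c then (st.1 ++ [c], false)
      else if st.2 then st else (st.1 ++ ['-'], true) := by
  unfold slugStepA slugKeep
  by_cases h1 : PySem.Chars.isalnum c
  · simp [h1]
  · simp only [h1, Bool.false_or, if_false]
    have : PySem.Chars.isIn [c] ['.', '_', '-'] = (c = '.' ∨ c = '_' ∨ c = '-' : Prop) := by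
      simp [PySem.Chars.isIn_iff_infix, List.singleton_infix_iff]
    by_cases h2 : c = '.' ∨ c = '_' ∨ c = '-'
    · simp [h2, this]
    · simp [h2, this]
      cases st.2 <;> simp

lemma foldl_slugStepA (l : List Char) (acc : List Char) (b : Bool) :
    (l.foldl slugStepA (acc, b)).1 = acc ++ slugG l b := by
  induction l generalizing acc b with
  | nil => simp [slugG]
  | cons c rest ih =>
    simp only [List.foldl_cons, slugStepA_eq, slugG]
    by_cases hk : slugKeep c
    · simp [hk, ih]
    · cases b <;> simp [hk, ih]

lemma slugRuns_cons_keep (c : Char) (rest : List Char) (h : slugKeep c = true) :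
    slugRuns (c :: rest) = c :: slugRuns rest := by
  rw [slugRuns]
  simp only [h, if_true]
  cases rest with
  | nil => simp [slugRuns]
  | cons d rs =>
    by_cases hd : slugKeep d
    · conv_rhs => rw [slugRuns]
      simp [hd]
    · simp [List.takeWhile_cons, List.dropWhile_cons, hd]

lemma slugRuns_cons_drop (c : Char) (rest : List Char) (h : slugKeep c = false) :
    slugRuns (c :: rest) = '-' :: slugRuns (rest.dropWhile (fun x => !slugKeep x)) := by
  rw [slugRuns]; simp [h]

lemma slugG_eq_slugRuns (l : List Char) :
    slugG l false = slugRuns l ∧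
      slugG l true = slugRuns (l.dropWhile (fun x => !slugKeep x)) := by
  induction l with
  | nil => simp [slugG, slugRuns]
  | cons c rest ih =>
    by_cases hk : slugKeep c
    · constructor
      · rw [slugRuns_cons_keep c rest hk]
        simp [slugG, hk, ih.1]
      · simp [List.dropWhile_cons, hk, slugRuns_cons_keep c rest hk, slugG, ih.1]
    · constructor
      · rw [slugRuns_cons_drop c rest (by simpa using hk)]
        simp [slugG, hk, ih.2]
      · simp [List.dropWhile_cons, hk, slugG, ih.2]

-- ===== VERDICT (by name: the statement is the Claim_ definition above) =====
theorem slugify_segment_spec : Claim_equal_slugify_segment := by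
  intro value _
  unfold Spec_slugify_segment slugify_segment slugify_segment_alt
  simp only [foldl_slugStepA, List.nil_append, (slugG_eq_slugRuns _).1]
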